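-- pv_equiv track=rewrite | github.com/ShenanigansBunul/CloudComputingHW | CloudHW2/api.py | zeros_table
-- ===== SOURCE A (Python) =====
-- def zeros_table(w, h):
--     s = "["
--     for i in range(h):
--         s += "["
--         line = ""
--         for j in range(w):
--             line += "0,"
--         line = line.rstrip(",")
--         s += line + "],"
--     s = s.rstrip(",")
--     s += "]"
--     return s
-- ===== SOURCE B (Python) =====
-- def zeros_table(w, h):
--     if h <= 0:
--         return "[]"
--     row = "[" + ",".join(["0"] * w) + "]"
--     return "[" + ",".join([row] * h) + "]"
-- ===== Notes on version B (the rewrite author's own statement) =====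
-- stated objective: idiomatic
-- what changed: Replaces the nested character-appending loops with trailing-comma stripping by joining replicated row/cell strings with ','.join (an h<=0 guard keeps the empty-grid case cheap).
import Mathlib
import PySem

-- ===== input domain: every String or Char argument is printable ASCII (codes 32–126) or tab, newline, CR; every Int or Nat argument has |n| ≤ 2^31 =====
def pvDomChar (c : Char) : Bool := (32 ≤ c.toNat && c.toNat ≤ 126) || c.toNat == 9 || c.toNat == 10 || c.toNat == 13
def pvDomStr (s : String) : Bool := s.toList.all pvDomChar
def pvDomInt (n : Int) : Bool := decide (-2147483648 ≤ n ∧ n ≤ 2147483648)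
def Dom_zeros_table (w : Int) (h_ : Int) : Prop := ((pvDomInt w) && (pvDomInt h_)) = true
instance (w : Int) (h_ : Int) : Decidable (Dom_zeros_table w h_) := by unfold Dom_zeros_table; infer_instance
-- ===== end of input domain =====

-- B replaces A's character-appending loops + rstrip(",") by joining replicated row strings with ','.join (idiomatic).

-- ===== PORT A =====
-- exact port of Python's s.rstrip(",") : drop all trailing ',' characters
def rstripComma (s : String) : String :=
  String.ofList ((s.toList.reverse.dropWhile (fun c => c == ',')).reverse)

def zeros_table (w : Int) (h_ : Int) : String :=
  let s := "["
  let s := (PySem.List.pyRange 0 h_ 1).foldl (fun s _i =>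
    let s := s ++ "["
    let line := (PySem.List.pyRange 0 w 1).foldl (fun line _j => line ++ "0,") ""
    let line := rstripComma line
    s ++ (line ++ "],")) s
  let s := rstripComma s
  s ++ "]"

-- ===== PORT B =====
def zeros_table_alt (w : Int) (h_ : Int) : String :=
  if h_ ≤ 0 then "[]"
  else
    let row := "[" ++ PySem.Str.join "," (List.replicate w.toNat "0") ++ "]"
    "[" ++ PySem.Str.join "," (List.replicate h_.toNat row) ++ "]"

-- ===== PRECONDITION & SPEC =====
def Spec_zeros_table (w : Int) (h_ : Int) (out : String) : Prop := out = zeros_table_alt w h_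
instance (w : Int) (h_ : Int) (out : String) : Decidable (Spec_zeros_table w h_ out) := by unfold Spec_zeros_table; infer_instance

-- ===== CLAIM (what is proved, stated in full; the proofs are below) =====
def Claim_equal_zeros_table : Prop := ∀ (w : Int) (h_ : Int), Dom_zeros_table w h_ → Spec_zeros_table w h_ (zeros_table w h_)

-- ===== LEMMAS AND PROOFS =====

-- list-level view of rstripComma
def rstL (l : List Char) : List Char := (l.reverse.dropWhile (fun c => c == ',')).reverse

theorem rstripComma_toList (s : String) : (rstripComma s).toList = rstL s.toList := by
  simp [rstripComma, rstL]

theorem rstL_nil : rstL [] = [] := rfl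

theorem rstL_append_comma (l : List Char) : rstL (l ++ [',']) = rstL l := by
  simp [rstL]

theorem rstL_snoc_ne (l : List Char) (c : Char) (h : c ≠ ',') :
    rstL (l ++ [c]) = l ++ [c] := by
  simp [rstL, h]

-- flatten of replicated (x ++ [',']) is the ','-join plus one trailing comma
theorem flat_rep (x : List Char) (n : Nat) :
    List.flatten (List.replicate n (x ++ [','])) =
      PySem.Chars.join [','] (List.replicate n x) ++ (if n = 0 then [] else [',']) := by
  induction n with
  | zero => simp [PySem.Chars.join_nil]
  | succ m ih =>
    cases m with
    | zero => simp [PySem.Chars.join_singleton]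
    | succ k =>
      simp only [List.replicate_succ, List.flatten_cons] at *
      rw [ih, PySem.Chars.join_cons_cons]
      simp

-- a ','-join of replicated snoc-lists ends with the same last character
theorem join_rep_snoc (y : List Char) (c : Char) (n : Nat) (hn : n ≠ 0) :
    ∃ z, PySem.Chars.join [','] (List.replicate n (y ++ [c])) = z ++ [c] := by
  induction n with
  | zero => exact absurd rfl hn
  | succ m ih =>
    cases m with
    | zero => exact ⟨y, by simp [PySem.Chars.join_singleton]⟩
    | succ k =>
      obtain ⟨z, hz⟩ := ih (by omega)
      refine ⟨(y ++ [c]) ++ [','] ++ z, ?_⟩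
      rw [List.replicate_succ, List.replicate_succ, PySem.Chars.join_cons_cons,
          ← List.replicate_succ, hz]
      simp

-- stripping the trailing comma off a joined block leaves the join
theorem rstL_block (p : List Char) (y : List Char) (c : Char) (hc : c ≠ ',') (n : Nat)
    (hp : ∃ q d, p = q ++ [d] ∧ d ≠ ',') :
    rstL (p ++ (PySem.Chars.join [','] (List.replicate n (y ++ [c])) ++ (if n = 0 then [] else [','])))
      = p ++ PySem.Chars.join [','] (List.replicate n (y ++ [c])) := by
  obtain ⟨q, d, hpq, hd⟩ := hp
  cases n with
  | zero =>
    subst hpq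
    simpa using rstL_snoc_ne q d hd
  | succ m =>
    obtain ⟨z, hz⟩ := join_rep_snoc y c (m+1) (by omega)
    simp only [if_neg (Nat.succ_ne_zero m)]
    rw [hz, show p ++ (z ++ [c] ++ [',']) = (p ++ z ++ [c]) ++ [','] by simp,
        rstL_append_comma, show p ++ z ++ [c] = (p ++ z) ++ [c] by simp,
        rstL_snoc_ne _ _ hc]
    simp

-- a foldl that appends a fixed string each step, seen on toList
theorem foldl_append_const (l : List Int) (u : List Char) (g : String → String)
    (hg : ∀ s, (g s).toList = s.toList ++ u) :
    ∀ init : String, ((l.foldl (fun s (_ : Int) => g s) init).toList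
      = init.toList ++ List.flatten (List.replicate l.length u)) := by
  induction l with
  | nil => intro init; simp
  | cons a t ih =>
    intro init
    simp only [List.foldl_cons, List.length_cons, List.replicate_succ, List.flatten_cons]
    rw [ih (g init), hg]
    simp

-- stripping with no prefix
theorem rstL_join (y : List Char) (c : Char) (hc : c ≠ ',') (n : Nat) :
    rstL (PySem.Chars.join [','] (List.replicate n (y ++ [c])) ++ (if n = 0 then [] else [',']))
      = PySem.Chars.join [','] (List.replicate n (y ++ [c])) := by
  cases n with
  | zero => simp [PySem.Chars.join_nil, rstL_nil]
  | succ m =>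
    obtain ⟨z, hz⟩ := join_rep_snoc y c (m+1) (by omega)
    rw [hz]
    simp only [if_neg (Nat.succ_ne_zero m)]
    rw [show z ++ [c] ++ [','] = (z ++ [c]) ++ [','] by simp, rstL_append_comma,
        rstL_snoc_ne _ _ hc]

-- the inner loop of A, on toList
theorem inner_fold (l : List Int) (init : String) :
    (l.foldl (fun line (_ : Int) => line ++ "0,") init).toList
      = init.toList ++ List.flatten (List.replicate l.length (['0'] ++ [','])) :=
  foldl_append_const l (['0'] ++ [',']) (fun s => s ++ "0,") (fun s => by simp) init

-- the outer loop of A, on toList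
theorem outer_fold (l : List Int) (C init : String) :
    (l.foldl (fun s (_ : Int) => (s ++ "[") ++ (C ++ "],")) init).toList
      = init.toList ++ List.flatten (List.replicate l.length ((['['] ++ C.toList ++ [']']) ++ [','])) :=
  foldl_append_const l ((['['] ++ C.toList ++ [']']) ++ [','])
    (fun s => (s ++ "[") ++ (C ++ "],")) (fun s => by simp) init

-- ===== VERDICT (by name: the statement is the Claim_ definition above) =====
theorem zeros_table_spec : Claim_equal_zeros_table := by
  intro w h_ _
  show zeros_table w h_ = zeros_table_alt w h_
  apply String.toList_inj.mp
  by_cases hh : h_ ≤ 0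
  · simp only [zeros_table, zeros_table_alt, if_pos hh,
      PySem.List.pyRange_one_eq_nil hh, List.foldl_nil]
    rfl
  simp only [zeros_table, zeros_table_alt, if_neg hh, String.toList_append, rstripComma_toList]
  rw [outer_fold, rstripComma_toList, inner_fold,
      PySem.List.length_pyRange_one, PySem.List.length_pyRange_one]
  simp only [Int.sub_zero, show ("".toList) = ([] : List Char) from rfl, List.nil_append]
  rw [flat_rep ['0'] w.toNat]
  have h0 : rstL (PySem.Chars.join [','] (List.replicate w.toNat ['0'])
        ++ (if w.toNat = 0 then [] else [',']))
      = PySem.Chars.join [','] (List.replicate w.toNat ['0']) := by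
    simpa using rstL_join [] '0' (by decide) w.toNat
  rw [h0]
  rw [flat_rep (['['] ++ PySem.Chars.join [','] (List.replicate w.toNat ['0']) ++ [']']) h_.toNat]
  have hb : rstL (['['] ++ (PySem.Chars.join [','] (List.replicate h_.toNat
          (['['] ++ PySem.Chars.join [','] (List.replicate w.toNat ['0']) ++ [']']))
        ++ (if h_.toNat = 0 then [] else [','])))
      = ['['] ++ PySem.Chars.join [','] (List.replicate h_.toNat
          (['['] ++ PySem.Chars.join [','] (List.replicate w.toNat ['0']) ++ [']'])) := by
    simpa using rstL_block ['['] (['['] ++ PySem.Chars.join [','] (List.replicate w.toNat ['0']))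
      ']' (by decide) h_.toNat ⟨[], '[', rfl, by decide⟩
  rw [show ("[".toList) = ['['] from rfl, hb]
  simp
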